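-- pv_equiv track=rewrite | github.com/timangs/coding_test | 프로그래머스/1/1845. 폰켓몬/폰켓몬_2.py | solution
-- ===== SOURCE A (Python) =====
-- def solution(nums:list)->int:
--     # only even numbers are vaild by restriction number 2.
--     maximum_len_of_args: int = len(nums)/2
--
--     # construct a dictionary with list nums.
--     dict_nums:dict = {}
--     for index,value in enumerate(nums):
--         dict_nums[index] = value
--
--     # execting that part will run the code.
--     selected_ponketmon: list = []
--     for value in dict_nums.values():
--         if value not in selected_ponketmon:
--             selected_ponketmon.append(value)
--
--     # section verifies that value stays within maximum length
--     if len(selected_ponketmon) > maximum_len_of_args: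
--         answer:int = int(maximum_len_of_args)
--     else:
--         answer:int = len(selected_ponketmon)
--
--     return answer
-- ===== SOURCE B (Python) =====
-- def solution(nums: list) -> int:
--     # sort, then count distinct values in one linear pass (new value whenever it differs from prev)
--     distinct = 0
--     prev = None
--     for x in sorted(nums):
--         if prev is None or x != prev:
--             distinct += 1
--         prev = x
--     return min(distinct, len(nums) // 2)
-- ===== Notes on version B (the rewrite author's own statement) =====
-- stated objective: faster
-- what changed: Replaces A's index-keyed dict rebuild and quadratic 'value not in selected' membership-scan dedup with a sort-then-adjacent-compare distinct count capped by len(nums)//2.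
import Mathlib
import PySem

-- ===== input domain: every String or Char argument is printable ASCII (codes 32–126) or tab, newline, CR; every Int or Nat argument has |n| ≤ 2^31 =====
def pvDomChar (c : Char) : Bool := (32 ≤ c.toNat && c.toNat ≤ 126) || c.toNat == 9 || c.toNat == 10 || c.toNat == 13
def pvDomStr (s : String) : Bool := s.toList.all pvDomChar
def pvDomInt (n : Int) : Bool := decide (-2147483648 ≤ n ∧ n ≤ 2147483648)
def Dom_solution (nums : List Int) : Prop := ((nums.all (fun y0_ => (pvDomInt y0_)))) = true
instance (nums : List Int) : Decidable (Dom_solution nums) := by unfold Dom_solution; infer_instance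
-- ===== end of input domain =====

-- B replaces A's dict rebuild + quadratic membership-scan dedup with sort-then-adjacent-compare (objective: faster).

-- ===== PORT A =====
-- maximum_len_of_args = len(nums)/2 is a Python float, exact here (|len| ≤ 2^31 is a dyadic value):
-- 'len(selected) > len(nums)/2' is ported exactly as 'len(selected)*2 > len(nums)', and
-- 'int(len(nums)/2)' (truncation of an exact half, len ≥ 0) as 'floordiv len 2'.
def solution (nums : List Int) : Int :=
  let n : Int := nums.length
  let dictNums : PySem.Dict Int Int :=
    (PySem.List.enumerate nums).foldl (fun d p => d.insert p.1 p.2) PySem.Dict.empty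
  let selected : List Int :=
    dictNums.values.foldl (fun acc v => if v ∈ acc then acc else acc ++ [v]) []
  if (selected.length : Int) * 2 > n then PySem.Int.floordiv n 2
  else (selected.length : Int)

-- ===== PORT B =====
-- loop body of Source B: state = (distinct, prev); 'if prev is None or x != prev: distinct += 1; prev = x'
def bStep (st : Int × Option Int) (x : Int) : Int × Option Int :=
  (if st.2 = none ∨ st.2 ≠ some x then st.1 + 1 else st.1, some x)

def solution_alt (nums : List Int) : Int :=
  let s := PySem.List.sorted nums (fun x => x) false
  let res := s.foldl bStep (0, none)
  min res.1 (PySem.Int.floordiv (nums.length : Int) 2)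

-- ===== PRECONDITION & SPEC =====
def Spec_solution (nums : List Int) (out : Int) : Prop := out = solution_alt nums
instance (nums : List Int) (out : Int) : Decidable (Spec_solution nums out) := by unfold Spec_solution; infer_instance

-- ===== CLAIM (what is proved, stated in full; the proofs are below) =====
def Claim_equal_solution : Prop := ∀ (nums : List Int), Dom_solution nums → Spec_solution nums (solution nums)

-- ===== LEMMAS AND PROOFS =====

theorem card_insert_eq_erase_add_one (x : Int) (S : Finset Int) :
    (insert x S).card = (S.erase x).card + 1 := by
  by_cases hx : x ∈ S
  · rw [Finset.card_insert_of_mem hx, Finset.card_erase_add_one hx]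
  · rw [Finset.card_insert_of_notMem hx, Finset.erase_eq_of_notMem hx]

-- A's dedup loop is exactly set-of-list in first-insertion order
theorem selected_eq_ofList (nums : List Int) :
    nums.foldl (fun acc v => if v ∈ acc then acc else acc ++ [v]) []
      = PySem.Set.ofList nums := by
  rw [PySem.Set.ofList_eq_foldl]
  apply PySem.List.foldl_congr_mem
  intro acc x _
  simp [PySem.Set.add, PySem.Set.contains]

theorem length_ofList_eq_card (nums : List Int) :
    ((PySem.Set.ofList nums).length : Int) = (nums.toFinset.card : Int) := by
  have hnd := PySem.Set.nodup_ofList (α := Int) (xs := nums)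
  have htf : (PySem.Set.ofList nums).toFinset = nums.toFinset := by
    ext y; simp [PySem.Set.mem_ofList]
  rw [← htf, List.toFinset_card_of_nodup hnd]

-- the dict built from enumerate has values = nums
theorem dict_values_eq (nums : List Int) :
    ((PySem.List.enumerate nums).foldl (fun d p => d.insert p.1 p.2)
      (PySem.Dict.empty : PySem.Dict Int Int)).values = nums := by
  have hfresh : ∀ p ∈ PySem.List.enumerate nums,
      (PySem.Dict.empty : PySem.Dict Int Int).contains p.1 = false := by
    intro p _; exact PySem.Dict.contains_empty _
  have hnd : ((PySem.List.enumerate nums).map Prod.fst).Nodup := by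
    have := PySem.List.pairwise_lt_enumerate (xs := nums) (s := 0)
    exact (this.map Prod.fst (fun a b h => h)).imp ne_of_lt
  have hitems := PySem.Dict.items_foldl_insert_fresh (l := PySem.List.enumerate nums)
    (k := Prod.fst) (v := Prod.snd) (d := PySem.Dict.empty) hfresh hnd
  have : ((PySem.List.enumerate nums).foldl (fun d p => d.insert p.1 p.2)
      (PySem.Dict.empty : PySem.Dict Int Int)).items
      = PySem.List.enumerate nums := by
    simpa [PySem.Dict.empty] using hitems
  simp [PySem.Dict.values, this, PySem.List.map_snd_enumerate]

-- B's loop, started after the first element: counts the values distinct from the running prev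
theorem bfold_go (l : List Int) (hs : l.Pairwise (· ≤ ·)) :
    ∀ (p c : Int), (∀ x ∈ l, p ≤ x) →
      (l.foldl bStep (c, some p)).1 = c + ((l.toFinset.erase p).card : Int) := by
  induction l with
  | nil => intro p c _; simp
  | cons x xs ih =>
    intro p c hp
    have hx : p ≤ x := hp x (by simp)
    have hxs : xs.Pairwise (· ≤ ·) := hs.tail
    have hxle : ∀ y ∈ xs, x ≤ y := fun y hy => (List.pairwise_cons.mp hs).1 y hy
    by_cases hpx : p = x
    · subst hpx
      have : bStep (c, some p) p = (c, some p) := by simp [bStep]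
      rw [List.foldl_cons, this, ih hxs p c hxle]
      simp [Finset.erase_insert_eq_erase]
    · have hstep : bStep (c, some p) x = (c + 1, some x) := by
        simp [bStep, hpx]
      have hpnot : p ∉ (x :: xs).toFinset := by
        simp only [List.toFinset_cons, Finset.mem_insert, List.mem_toFinset]
        rintro (rfl | hpmem)
        · exact hpx rfl
        · exact hpx (le_antisymm hx (hxle p hpmem))
      rw [List.foldl_cons, hstep, ih hxs x (c + 1) hxle,
        Finset.erase_eq_of_notMem hpnot]
      have : ((x :: xs).toFinset).card = (xs.toFinset.erase x).card + 1 := by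
        simpa using card_insert_eq_erase_add_one x xs.toFinset
      rw [this]
      push_cast
      ring

theorem bfold_count (l : List Int) (hs : l.Pairwise (· ≤ ·)) :
    (l.foldl bStep (0, none)).1 = (l.toFinset.card : Int) := by
  cases l with
  | nil => simp
  | cons x xs =>
    have hstep : bStep (0, none) x = (1, some x) := by simp [bStep]
    have hxle : ∀ y ∈ xs, x ≤ y := fun y hy => (List.pairwise_cons.mp hs).1 y hy
    rw [List.foldl_cons, hstep, bfold_go xs hs.tail x 1 hxle]
    have : ((x :: xs).toFinset).card = (xs.toFinset.erase x).card + 1 := by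
      simpa using card_insert_eq_erase_add_one x xs.toFinset
    rw [this]
    push_cast
    ring

-- ===== VERDICT (by name: the statement is the Claim_ definition above) =====
theorem solution_spec : Claim_equal_solution := by
  intro nums _
  unfold Spec_solution
  simp only [solution, solution_alt]
  rw [dict_values_eq, selected_eq_ofList, length_ofList_eq_card]
  have hsorted : (PySem.List.sorted nums (fun x => x) false).Pairwise (· ≤ ·) :=
    PySem.List.sorted_pairwise (xs := nums) (key := fun x => x)
  rw [bfold_count _ hsorted]
  have htf : (PySem.List.sorted nums (fun x => x) false).toFinset = nums.toFinset := by
    ext y; simp [PySem.List.mem_sorted]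
  rw [htf]
  have hcard : nums.toFinset.card ≤ nums.length := nums.toFinset_card_le
  rw [PySem.Int.floordiv_eq_ediv_of_pos (by omega : (0:Int) < 2)]
  have h0 : (0:Int) ≤ (nums.length : Int) := by positivity
  omega
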